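-- pv_equiv track=rewrite | github.com/hyunjun1121/dias-NL2SQL | model/progressive_executor.py | _is_syntax_error
-- ===== SOURCE A (Python) =====
-- def _is_syntax_error(error_msg: str) -> bool:
--     """Check if error is syntax-related (retriable)."""
--     syntax_keywords = [
--         'syntax error',
--         'near',
--         'unrecognized token',
--         'incomplete input',
--         'mismatched input',
--         'expected'
--     ]
--     error_lower = error_msg.lower()
--     return any(kw in error_lower for kw in syntax_keywords)
-- ===== SOURCE B (Python) =====
-- def _is_syntax_error(error_msg: str) -> bool:
--     """Check if error is syntax-related (retriable)."""
--     keywords = (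
--         'syntax error',
--         'near',
--         'unrecognized token',
--         'incomplete input',
--         'mismatched input',
--         'expected',
--     )
--     s = error_msg.lower()
--     # single left-to-right scan: at each position test whether some keyword starts here
--     for i in range(len(s)):
--         for kw in keywords:
--             if s.startswith(kw, i):
--                 return True
--     return False
-- ===== Notes on version B (the rewrite author's own statement) =====
-- stated objective: alternative
-- what changed: B replaces A's per-keyword substring search (one full scan of the message for each of the six keywords) by a single left-to-right scan over the lowercased message that at each position tests whether any keyword starts there.
import Mathlib
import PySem

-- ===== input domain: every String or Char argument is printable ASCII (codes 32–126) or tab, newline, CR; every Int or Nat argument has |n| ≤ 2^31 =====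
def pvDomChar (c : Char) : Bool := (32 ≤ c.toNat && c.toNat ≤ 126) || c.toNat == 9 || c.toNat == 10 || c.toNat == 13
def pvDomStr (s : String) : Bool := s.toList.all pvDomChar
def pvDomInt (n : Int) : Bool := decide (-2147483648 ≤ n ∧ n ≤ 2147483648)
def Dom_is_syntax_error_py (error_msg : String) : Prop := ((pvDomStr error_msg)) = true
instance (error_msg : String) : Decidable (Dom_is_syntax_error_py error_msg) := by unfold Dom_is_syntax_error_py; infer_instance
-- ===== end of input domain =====

-- B replaces A's per-keyword substring search by a single left-to-right scan of the
-- lowercased message that tests at each position whether some keyword starts there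
-- (alternative decomposition; same asymptotic cost).

-- ===== PORT A =====
-- the keyword list of A (identical literal list in B)
def pvSyntaxKeywords : List String :=
  ["syntax error", "near", "unrecognized token", "incomplete input", "mismatched input", "expected"]

def is_syntax_error_py (error_msg : String) : Bool :=
  let error_lower := PySem.Str.lower error_msg
  pvSyntaxKeywords.any (fun kw => PySem.Str.isIn kw error_lower)

-- ===== PORT B =====
-- tail-scan: at each suffix of the char list, test whether some keyword is a prefix
def pvAltScan (kws : List (List Char)) : List Char → Bool
  | [] => false
  | c :: t => kws.any (fun kw => kw.isPrefixOf (c :: t)) || pvAltScan kws t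

def is_syntax_error_py_alt (error_msg : String) : Bool :=
  pvAltScan (pvSyntaxKeywords.map String.toList) (PySem.Str.lower error_msg).toList

-- ===== PRECONDITION & SPEC =====
def Spec_is_syntax_error_py (error_msg : String) (out : Bool) : Prop := out = is_syntax_error_py_alt error_msg
instance (error_msg : String) (out : Bool) : Decidable (Spec_is_syntax_error_py error_msg out) := by unfold Spec_is_syntax_error_py; infer_instance

-- ===== CLAIM (what is proved, stated in full; the proofs are below) =====
def Claim_equal_is_syntax_error_py : Prop := ∀ (error_msg : String), Dom_is_syntax_error_py error_msg → Spec_is_syntax_error_py error_msg (is_syntax_error_py error_msg)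

-- ===== LEMMAS AND PROOFS =====

-- B's scan finds exactly the nonempty keywords occurring as an infix
theorem pvAltScan_iff (kws : List (List Char)) (hne : ∀ kw ∈ kws, kw ≠ [])
    (cs : List Char) : pvAltScan kws cs = true ↔ ∃ kw ∈ kws, kw <:+: cs := by
  induction cs with
  | nil =>
    simp only [pvAltScan]
    constructor
    · intro h; exact absurd h (by simp)
    · rintro ⟨kw, hmem, hinf⟩
      exact absurd (List.eq_nil_of_infix_nil hinf) (hne kw hmem)
  | cons c t ih =>
    simp only [pvAltScan, Bool.or_eq_true, List.any_eq_true, ih]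
    constructor
    · rintro (⟨kw, hmem, hp⟩ | ⟨kw, hmem, hinf⟩)
      · exact ⟨kw, hmem, ((List.isPrefixOf_iff_prefix).mp hp).isInfix⟩
      · exact ⟨kw, hmem, hinf.trans (List.suffix_cons c t).isInfix⟩
    · rintro ⟨kw, hmem, hinf⟩
      rcases List.infix_cons_iff.mp hinf with hp | hinf'
      · exact Or.inl ⟨kw, hmem, (List.isPrefixOf_iff_prefix).mpr hp⟩
      · exact Or.inr ⟨kw, hmem, hinf'⟩

-- ===== VERDICT (by name: the statement is the Claim_ definition above) =====
theorem is_syntax_error_py_spec : Claim_equal_is_syntax_error_py := by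
  intro s _
  unfold Spec_is_syntax_error_py
  unfold is_syntax_error_py is_syntax_error_py_alt
  have hne : ∀ kw ∈ pvSyntaxKeywords.map String.toList, kw ≠ [] := by decide
  rw [Bool.eq_iff_iff]
  rw [pvAltScan_iff _ hne]
  simp only [List.any_eq_true, PySem.Str.isIn_iff_infix, List.mem_map]
  constructor
  · rintro ⟨kw, hmem, hinf⟩
    exact ⟨kw.toList, ⟨kw, hmem, rfl⟩, hinf⟩
  · rintro ⟨_, ⟨kw, hmem, rfl⟩, hinf⟩
    exact ⟨kw, hmem, hinf⟩
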